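-- pv_equiv track=rewrite | github.com/Payvo-ai/payvo-middleware | payvo-middleware/app/services/fingerprint_service.py | _calculate_proximity_zones
-- ===== SOURCE A (Python) =====
-- from typing import Dict, List, Optional, Any, Tuple
--
-- def _calculate_proximity_zones(rssi_values: List[int]) -> Dict[str, int]:
--     """Calculate BLE proximity zones based on RSSI values"""
--     zones = {'immediate': 0, 'near': 0, 'far': 0}
--
--     for rssi in rssi_values:
--         if rssi > -50:
--             zones['immediate'] += 1
--         elif -70 <= rssi <= -50:
--             zones['near'] += 1
--         else:
--             zones['far'] += 1
--
--     return zones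
-- ===== SOURCE B (Python) =====
-- def _calculate_proximity_zones(rssi_values):
--     """Calculate BLE proximity zones based on RSSI values"""
--     return {
--         'immediate': sum(1 for r in rssi_values if r > -50),
--         'near': sum(1 for r in rssi_values if -70 <= r <= -50),
--         'far': sum(1 for r in rssi_values if r < -70),
--     }
-- ===== Notes on version B (the rewrite author's own statement) =====
-- stated objective: alternative
-- what changed: Replaces the single mutate-a-dict-as-you-go loop with three independent filtering passes, one generator-sum per zone, assembled directly into the result dict.
import Mathlib
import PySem

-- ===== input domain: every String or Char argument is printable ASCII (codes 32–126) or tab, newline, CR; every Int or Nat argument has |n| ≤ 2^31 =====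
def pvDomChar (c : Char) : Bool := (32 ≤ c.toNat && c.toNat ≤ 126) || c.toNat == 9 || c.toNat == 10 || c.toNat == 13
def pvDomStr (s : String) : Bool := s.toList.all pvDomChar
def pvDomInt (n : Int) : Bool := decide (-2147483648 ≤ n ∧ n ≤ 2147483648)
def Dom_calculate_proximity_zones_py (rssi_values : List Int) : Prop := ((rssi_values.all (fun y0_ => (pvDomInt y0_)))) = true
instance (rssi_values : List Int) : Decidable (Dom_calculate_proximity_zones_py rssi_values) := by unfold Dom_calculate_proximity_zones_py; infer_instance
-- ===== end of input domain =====

-- ===== PORT A =====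
-- B uses three independent filter passes instead of A's one mutate-as-you-go loop; objective: alternative decomposition.
def calculate_proximity_zones_py (rssi_values : List Int) : List (String × Int) :=
  let zones : PySem.Dict String Int :=
    PySem.Dict.ofList [("immediate", 0), ("near", 0), ("far", 0)]
  let zones := rssi_values.foldl (fun zones rssi =>
    if rssi > -50 then zones.modify "immediate" 0 (· + 1)
    else if -70 ≤ rssi ∧ rssi ≤ -50 then zones.modify "near" 0 (· + 1)
    else zones.modify "far" 0 (· + 1)) zones
  zones.items

-- ===== PORT B =====
def calculate_proximity_zones_py_alt (rssi_values : List Int) : List (String × Int) :=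
  [("immediate", ((rssi_values.filter (fun r => -50 < r)).length : Int)),
   ("near", ((rssi_values.filter (fun r => -70 ≤ r ∧ r ≤ -50)).length : Int)),
   ("far", ((rssi_values.filter (fun r => r < -70)).length : Int))]

-- ===== PRECONDITION & SPEC =====
def Spec_calculate_proximity_zones_py (rssi_values : List Int) (out : List (String × Int)) : Prop := out = calculate_proximity_zones_py_alt rssi_values
instance (rssi_values : List Int) (out : List (String × Int)) : Decidable (Spec_calculate_proximity_zones_py rssi_values out) := by unfold Spec_calculate_proximity_zones_py; infer_instance

-- ===== CLAIM (what is proved, stated in full; the proofs are below) =====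
def Claim_equal_calculate_proximity_zones_py : Prop := ∀ (rssi_values : List Int), Dom_calculate_proximity_zones_py rssi_values → Spec_calculate_proximity_zones_py rssi_values (calculate_proximity_zones_py rssi_values)

-- ===== LEMMAS AND PROOFS =====

lemma zones_foldl (l : List Int) (i n f : Int) :
    l.foldl (fun zones rssi =>
      if rssi > -50 then zones.modify "immediate" 0 (· + 1)
      else if -70 ≤ rssi ∧ rssi ≤ -50 then zones.modify "near" 0 (· + 1)
      else zones.modify "far" 0 (· + 1))
      (PySem.Dict.mk [("immediate", i), ("near", n), ("far", f)]) =
    PySem.Dict.mk [("immediate", i + (l.filter (fun r => -50 < r)).length),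
                   ("near", n + (l.filter (fun r => -70 ≤ r ∧ r ≤ -50)).length),
                   ("far", f + (l.filter (fun r => r < -70)).length)] := by
  induction l generalizing i n f with
  | nil => simp
  | cons x xs ih =>
    simp only [List.foldl_cons, List.filter_cons]
    by_cases h1 : x > -50
    · have : (PySem.Dict.mk [("immediate", i), ("near", n), ("far", f)]).modify "immediate" 0 (· + 1)
          = PySem.Dict.mk [("immediate", i + 1), ("near", n), ("far", f)] := by
        simp [PySem.Dict.modify, PySem.Dict.contains, PySem.Dict.getD, PySem.Dict.get?, PySem.Dict.insert]
      rw [if_pos h1, this, ih]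
      have h2 : ¬ (-70 ≤ x ∧ x ≤ -50) := by omega
      have h3 : ¬ (x < -70) := by omega
      simp [h1, h2, h3]
      omega
    · have h1' : ¬ x > -50 := h1
      by_cases h2 : -70 ≤ x ∧ x ≤ -50
      · have : (PySem.Dict.mk [("immediate", i), ("near", n), ("far", f)]).modify "near" 0 (· + 1)
            = PySem.Dict.mk [("immediate", i), ("near", n + 1), ("far", f)] := by
          simp [PySem.Dict.modify, PySem.Dict.contains, PySem.Dict.getD, PySem.Dict.get?, PySem.Dict.insert]
        rw [if_neg h1', if_pos h2, this, ih]
        have h3 : ¬ (x < -70) := by omega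
        simp [h1, h2, h3]
        omega
      · have : (PySem.Dict.mk [("immediate", i), ("near", n), ("far", f)]).modify "far" 0 (· + 1)
            = PySem.Dict.mk [("immediate", i), ("near", n), ("far", f + 1)] := by
          simp [PySem.Dict.modify, PySem.Dict.contains, PySem.Dict.getD, PySem.Dict.get?, PySem.Dict.insert]
        rw [if_neg h1', if_neg h2, this, ih]
        have h3 : x < -70 := by omega
        simp [h1, h2, h3]
        omega

-- ===== VERDICT (by name: the statement is the Claim_ definition above) =====
theorem calculate_proximity_zones_py_spec : Claim_equal_calculate_proximity_zones_py := by
  intro rssi_values _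
  show _ = _
  simp only [calculate_proximity_zones_py, calculate_proximity_zones_py_alt, PySem.Dict.ofList]
  rw [show (PySem.Dict.update PySem.Dict.empty [("immediate", (0:Int)), ("near", 0), ("far", 0)]) =
      PySem.Dict.mk [("immediate", 0), ("near", 0), ("far", 0)] from rfl]
  rw [zones_foldl]
  simp
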